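-- pv_equiv track=rewrite | github.com/jaakkopaakkonen/rung | taskgraph/matrix.py | remove_trailing_none
-- ===== SOURCE A (Python) =====
-- def remove_trailing_none(matrix):
--     row_idx = 0
--     while row_idx < len(matrix):
--         row = matrix[row_idx]
--         column_idx = len(row) - 1
--         while column_idx >= 0 and row[column_idx] is None:
--             column_idx -= 1
--         matrix[row_idx] = matrix[row_idx][:column_idx+1]
--         row_idx += 1
--     return matrix
-- ===== SOURCE B (Python) =====
-- def remove_trailing_none(matrix):
--     for i, row in enumerate(matrix):
--         last = -1
--         for j, v in enumerate(row):
--             if v is not None: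
--                 last = j
--         matrix[i] = row[:last + 1]
--     return matrix
-- ===== Notes on version B (the rewrite author's own statement) =====
-- stated objective: alternative
-- what changed: Replaces A's backward early-stopping scan per row with a single forward pass that maintains the index of the last non-None element, then slices to that index.
import Mathlib
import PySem

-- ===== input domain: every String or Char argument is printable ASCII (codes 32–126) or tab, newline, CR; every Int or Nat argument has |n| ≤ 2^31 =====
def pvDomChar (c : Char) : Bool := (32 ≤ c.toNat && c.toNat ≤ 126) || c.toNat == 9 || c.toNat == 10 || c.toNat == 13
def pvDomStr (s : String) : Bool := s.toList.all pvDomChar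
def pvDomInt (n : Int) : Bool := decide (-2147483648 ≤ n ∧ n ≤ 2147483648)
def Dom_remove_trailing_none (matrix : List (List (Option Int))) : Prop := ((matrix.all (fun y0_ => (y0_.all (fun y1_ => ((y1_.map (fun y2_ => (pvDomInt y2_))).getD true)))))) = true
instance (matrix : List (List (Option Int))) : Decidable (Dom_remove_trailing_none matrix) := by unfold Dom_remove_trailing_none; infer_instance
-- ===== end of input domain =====

-- ===== PORT A =====
-- A: trim trailing None from each row via a backward early-stopping scan, in place.
-- (Python A mutates `matrix` in place; the equivalence proved here is about the return value.)
-- backLoopA row n transcribes `while column_idx >= 0 and row[column_idx] is None: column_idx -= 1`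
-- with n = column_idx + 1 (so n = 0 encodes column_idx = -1); it returns final column_idx + 1.
def backLoopA (row : List (Option Int)) : Nat → Nat
  | 0 => 0
  | n + 1 => if PySem.List.pyGet? row (n : Int) = some none then backLoopA row n else n + 1

-- the outer `while row_idx < len(matrix)` rewrites each row independently: a map over rows;
-- matrix[row_idx][:column_idx+1] with column_idx+1 ≥ 0 is `take (column_idx+1)`.
def remove_trailing_none (matrix : List (List (Option Int))) : List (List (Option Int)) :=
  matrix.map (fun row => row.take (backLoopA row row.length))

-- ===== PORT B =====
-- B: one forward pass per row tracking the index of the last non-None element.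
def fwdLastB (row : List (Option Int)) : Int :=
  (PySem.List.enumerate row 0).foldl (fun last jv => if jv.2 ≠ none then jv.1 else last) (-1)

def remove_trailing_none_alt (matrix : List (List (Option Int))) : List (List (Option Int)) :=
  matrix.map (fun row => PySem.List.slice row none (some (fwdLastB row + 1)))

-- ===== PRECONDITION & SPEC =====
def Spec_remove_trailing_none (matrix : List (List (Option Int))) (out : List (List (Option Int))) : Prop := out = remove_trailing_none_alt matrix
instance (matrix : List (List (Option Int))) (out : List (List (Option Int))) : Decidable (Spec_remove_trailing_none matrix out) := by unfold Spec_remove_trailing_none; infer_instance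

-- ===== CLAIM (what is proved, stated in full; the proofs are below) =====
def Claim_equal_remove_trailing_none : Prop := ∀ (matrix : List (List (Option Int))), Dom_remove_trailing_none matrix → Spec_remove_trailing_none matrix (remove_trailing_none matrix)

-- ===== LEMMAS AND PROOFS =====

-- ===== VERDICT (by name: the statement is the Claim_ definition above) =====
theorem enumerate_concat {α : Type} (l : List α) (x : α) (s : Int) :
    PySem.List.enumerate (l ++ [x]) s = PySem.List.enumerate l s ++ [(s + l.length, x)] := by
  induction l generalizing s with
  | nil => simp [PySem.List.enumerate_cons, PySem.List.enumerate_nil]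
  | cons a t ih =>
      simp only [List.cons_append, PySem.List.enumerate_cons, ih (s + 1), List.length_cons]
      congr 3
      push_cast
      ring

theorem fwdLastB_concat (row : List (Option Int)) (x : Option Int) :
    fwdLastB (row ++ [x]) = if x ≠ none then (row.length : Int) else fwdLastB row := by
  simp [fwdLastB, enumerate_concat, List.foldl_append]

theorem backLoopA_append (row : List (Option Int)) (x : Option Int) :
    ∀ n, n ≤ row.length → backLoopA (row ++ [x]) n = backLoopA row n := by
  intro n hn
  induction n with
  | zero => rfl
  | succ m ih =>
      have hm : m < row.length := by omega
      simp [backLoopA, PySem.List.pyGet?_natCast, List.getElem?_append_left hm,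
        ih (by omega)]

theorem backLoopA_concat (row : List (Option Int)) (x : Option Int) :
    backLoopA (row ++ [x]) (row.length + 1) =
      if x = none then backLoopA row row.length else row.length + 1 := by
  have hget : PySem.List.pyGet? (row ++ [x]) (row.length : Int) = some x := by
    exact PySem.List.pyGet?_append_length row [] x
  simp only [backLoopA, hget]
  by_cases hx : x = none
  · subst hx; simp [backLoopA_append row none row.length le_rfl]
  · simp [hx]

theorem fwd_eq_back (row : List (Option Int)) :
    fwdLastB row + 1 = (backLoopA row row.length : Int) := by
  induction row using List.reverseRecOn with
  | nil => simp [fwdLastB, PySem.List.enumerate_nil, backLoopA]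
  | append_singleton t x ih =>
      rw [List.length_append]
      simp only [List.length_singleton]
      rw [backLoopA_concat, fwdLastB_concat]
      by_cases hx : x = none
      · simpa [hx] using ih
      · simp [hx]

theorem row_eq (row : List (Option Int)) :
    row.take (backLoopA row row.length) =
      PySem.List.slice row none (some (fwdLastB row + 1)) := by
  rw [fwd_eq_back]
  rw [PySem.List.slice_to row (Int.natCast_nonneg _)]
  simp

-- ===== VERDICT (by name: the statement is the Claim_ definition above) =====
theorem remove_trailing_none_spec : Claim_equal_remove_trailing_none := by
  intro matrix _
  show remove_trailing_none matrix = remove_trailing_none_alt matrix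
  unfold remove_trailing_none remove_trailing_none_alt
  exact List.map_congr_left (fun row _ => row_eq row)
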